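-- pv_equiv track=rewrite | github.com/fish-ball/codejam | GCJ2016 Round2/d.py | pre_do
-- ===== SOURCE A (Python) =====
-- def pre_do(g):
--     n = len(g)
--     ans = 0
--     for i in range(n):
--         for j in range(n):
--             for k in range(n):
--                 for l in range(n):
--                     if g[j][k] and g[k][l] and not g[j][l]:
--                         ans += 1
--                         g[j][l] = 1
--     return ans
-- ===== SOURCE B (Python) =====
-- # Floyd-Warshall transitive closure (O(n^3)) instead of A's n repeated squaring passes
-- # (O(n^4)); counts entries that are in the closure but falsy in the input.
-- # Equivalence is about the RETURN value only: A mutates g in place, B does not.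
-- def pre_do(g):
--     n = len(g)
--     c = [[bool(g[j][l]) for l in range(n)] for j in range(n)]
--     for k in range(n):
--         ck = c[k]
--         for j in range(n):
--             if c[j][k]:
--                 cj = c[j]
--                 for l in range(n):
--                     if ck[l]:
--                         cj[l] = True
--     return sum(1 for j in range(n) for l in range(n) if c[j][l] and not g[j][l])
-- ===== Notes on version B (the rewrite author's own statement) =====
-- stated objective: faster
-- what changed: Replaced A's n in-place squaring passes over the whole matrix (quadruple loop) by a single Floyd-Warshall transitive-closure pass on a boolean copy, counting closure entries whose input entry is falsy.
import Mathlib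
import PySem

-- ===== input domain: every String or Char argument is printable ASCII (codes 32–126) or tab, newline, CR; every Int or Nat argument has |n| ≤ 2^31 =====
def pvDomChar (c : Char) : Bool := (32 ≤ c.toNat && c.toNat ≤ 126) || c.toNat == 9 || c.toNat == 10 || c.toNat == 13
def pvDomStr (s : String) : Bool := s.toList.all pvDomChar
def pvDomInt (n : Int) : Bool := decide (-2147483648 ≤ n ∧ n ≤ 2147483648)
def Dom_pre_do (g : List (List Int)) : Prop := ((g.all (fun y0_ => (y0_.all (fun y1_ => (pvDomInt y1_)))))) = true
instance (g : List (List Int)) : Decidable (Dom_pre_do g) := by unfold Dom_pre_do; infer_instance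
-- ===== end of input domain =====

-- ===== PORT A =====
-- Header: B replaces A's n in-place squaring passes (O(n^4)) by one Floyd-Warshall
-- closure pass (O(n^3)); return values agree (A mutates g in place, B does not —
-- the equivalence proved here is about the return value only).
-- A's loops are `range(n)` with n = len(g) ≥ 0; all indices are nonnegative and
-- in 0..n-1, so they are ported exactly as `List.range n` with Nat indices.
-- `g[j][k]` is ported as getD with defaults; inside Pre_ (rows of length ≥ n)
-- every access is in range, so the defaults are never hit and the port is exact.
def pvEntry (m : List (List Int)) (j l : Nat) : Int := (m.getD j []).getD l 0

-- `g[j][l] = 1`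
def pvSet1 (m : List (List Int)) (j l : Nat) : List (List Int) :=
  m.set j ((m.getD j []).set l 1)

-- body of A's innermost loop: state = (matrix, ans)
def preStep (st : List (List Int) × Int) (j k l : Nat) : List (List Int) × Int :=
  if pvEntry st.1 j k != 0 && (pvEntry st.1 k l != 0) && !(pvEntry st.1 j l != 0) then
    (pvSet1 st.1 j l, st.2 + 1)
  else st

-- A's `for j: for k: for l:` body (one pass, for one value of the outer i)
def prePass (n : Nat) (st : List (List Int) × Int) : List (List Int) × Int :=
  (List.range n).foldl (fun st j =>
    (List.range n).foldl (fun st k =>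
      (List.range n).foldl (fun st l => preStep st j k l) st) st) st

def pre_do (g : List (List Int)) : Int :=
  let n := g.length
  ((List.range n).foldl (fun st _i => prePass n st) (g, 0)).2

-- ===== PORT B =====
def pvB (c : List (List Bool)) (j l : Nat) : Bool := (c.getD j []).getD l false

-- B's inner `for l in range(n): if ck[l]: cj[l] = True`
def fwRow (ck : List Bool) (n : Nat) (row : List Bool) : List Bool :=
  (List.range n).foldl (fun r l => if ck.getD l false then r.set l true else r) row

-- B's body of the outer `for k` loop (ck = c[k] bound once, as in Source B)
def fwK (n : Nat) (c : List (List Bool)) (k : Nat) : List (List Bool) :=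
  let ck := c.getD k []
  (List.range n).foldl (fun c j =>
    if pvB c j k then c.set j (fwRow ck n (c.getD j [])) else c) c

def pre_do_alt (g : List (List Int)) : Int :=
  let n := g.length
  let c0 := (List.range n).map (fun j => (List.range n).map (fun l => pvEntry g j l != 0))
  let c := (List.range n).foldl (fwK n) c0
  ((List.range n).map (fun j =>
    ((List.range n).map (fun l =>
      if pvB c j l && !(pvEntry g j l != 0) then (1 : Int) else 0)).sum)).sum

-- ===== PRECONDITION & SPEC =====
-- Python A unconditionally reads g[j][k] for all j,k < len(g), so it raises
-- IndexError exactly when some row is shorter than len(g); Pre_ excludes those.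
def Pre_pre_do (g : List (List Int)) : Prop := ∀ row ∈ g, g.length ≤ row.length
instance (g : List (List Int)) : Decidable (Pre_pre_do g) := by unfold Pre_pre_do; infer_instance
def pvWitness_pre_do : List (List Int) := [[0, 1], [1, 0]]

def Spec_pre_do (g : List (List Int)) (out : Int) : Prop := out = pre_do_alt g
instance (g : List (List Int)) (out : Int) : Decidable (Spec_pre_do g out) := by unfold Spec_pre_do; infer_instance

-- ===== CLAIM (what is proved, stated in full; the proofs are below) =====
def Claim_equal_pre_do : Prop := ∀ (g : List (List Int)), Dom_pre_do g → Pre_pre_do g → Spec_pre_do g (pre_do g)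

-- ===== LEMMAS AND PROOFS =====

-- ---- generic list/fold helpers ----

theorem pvFoldlInv {σ α : Type} {P : σ → Prop} {f : σ → α → σ} {xs : List α}
    (h : ∀ s a, a ∈ xs → P s → P (f s a)) {s : σ} (hs : P s) : P (xs.foldl f s) := by
  induction xs generalizing s with
  | nil => exact hs
  | cons x xs ih =>
      exact ih (fun s a ha hp => h s a (List.mem_cons_of_mem _ ha) hp)
        (h s x (List.mem_cons_self) hs)

theorem pvFoldlSplitAt {σ : Type} (F : σ → Nat → σ) (n k : Nat) (hk : k < n) (s : σ) :
    (List.range n).foldl F s =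
      ((List.range (n - (k + 1))).map (fun x => (k + 1) + x)).foldl F
        (F ((List.range k).foldl F s) k) := by
  have hsplit : List.range n =
      (List.range k ++ [k]) ++ (List.range (n - (k + 1))).map (fun x => (k + 1) + x) := by
    rw [← List.range_succ, ← List.range_add]
    congr 1
    omega
  rw [hsplit, List.foldl_append, List.foldl_append, List.foldl_cons, List.foldl_nil]

theorem pvGetDSet {α : Type} (xs : List α) (i j : Nat) (v d : α) :
    (xs.set i v).getD j d = if i = j ∧ i < xs.length then v else xs.getD j d := by
  by_cases hij : i = j
  · subst hij
    by_cases hlen : i < xs.length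
    · simp [List.getD_eq_getElem?_getD, List.getElem?_set, hlen]
    · simp [List.getD_eq_getElem?_getD, hlen,
        List.getElem?_eq_none (le_of_not_gt hlen)]
  · simp [List.getD_eq_getElem?_getD, hij]

-- ---- entries and pvSet1 ----

theorem pvEntrySet (m : List (List Int)) (j l a b : Nat) :
    pvEntry (pvSet1 m j l) a b =
      if j = a ∧ j < m.length ∧ l = b ∧ l < (m.getD j []).length then 1
      else pvEntry m a b := by
  unfold pvEntry pvSet1
  rw [pvGetDSet]
  by_cases h1 : j = a ∧ j < m.length
  · rw [if_pos h1]
    obtain ⟨rfl, hjl⟩ := h1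
    rw [pvGetDSet]
    by_cases h2 : l = b ∧ l < (m.getD j []).length
    · rw [if_pos h2, if_pos ⟨rfl, hjl, h2.1, h2.2⟩]
    · rw [if_neg h2, if_neg (by tauto)]
  · rw [if_neg h1, if_neg (by tauto)]

theorem pvEntrySetCases (m : List (List Int)) (j l a b : Nat) :
    pvEntry (pvSet1 m j l) a b = pvEntry m a b ∨ pvEntry (pvSet1 m j l) a b = 1 := by
  rw [pvEntrySet]; split_ifs <;> simp

theorem pvEntrySetHit (m : List (List Int)) (j l : Nat)
    (hj : j < m.length) (hl : l < (m.getD j []).length) :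
    pvEntry (pvSet1 m j l) j l = 1 := by
  rw [pvEntrySet]; exact if_pos ⟨rfl, hj, rfl, hl⟩

-- ---- edges and paths ----

def EdgeG (g : List (List Int)) (a b : Nat) : Prop := pvEntry g a b ≠ 0

def PathE (g : List (List Int)) : Nat → List Nat → Nat → Prop
  | j, [], l => EdgeG g j l
  | j, x :: p, l => EdgeG g j x ∧ PathE g x p l

-- paths from j to l whose intermediate vertices are all < k
def Conn (g : List (List Int)) (k j l : Nat) : Prop :=
  ∃ p : List Nat, (∀ v ∈ p, v < k) ∧ PathE g j p l

theorem pathE_append (g : List (List Int)) (p : List Nat) :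
    ∀ (j x l : Nat) (q : List Nat),
      PathE g j (p ++ x :: q) l ↔ (PathE g j p x ∧ PathE g x q l) := by
  induction p with
  | nil => intro j x l q; simp [PathE, and_assoc]
  | cons y p ih =>
      intro j x l q
      simp only [List.cons_append, PathE, ih, and_assoc]

theorem conn_zero (g : List (List Int)) (j l : Nat) : Conn g 0 j l ↔ EdgeG g j l := by
  constructor
  · rintro ⟨p, hp, hpath⟩
    cases p with
    | nil => exact hpath
    | cons x p => exact absurd (hp x (List.mem_cons_self)) (by omega)
  · intro h; exact ⟨[], by simp, h⟩

theorem conn_widen (g : List (List Int)) {k k' j l : Nat} (hk : k ≤ k') :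
    Conn g k j l → Conn g k' j l := by
  rintro ⟨p, hp, hpath⟩
  exact ⟨p, fun v hv => lt_of_lt_of_le (hp v hv) hk, hpath⟩

theorem conn_comp (g : List (List Int)) {n j k l : Nat} (hk : k < n) :
    Conn g n j k → Conn g n k l → Conn g n j l := by
  rintro ⟨p, hp, hpath⟩ ⟨q, hq, hqpath⟩
  refine ⟨p ++ k :: q, ?_, (pathE_append g p j k l q).2 ⟨hpath, hqpath⟩⟩
  intro v hv
  rcases List.mem_append.1 hv with h | h
  · exact hp v h
  · rcases List.mem_cons.1 h with rfl | h
    · exact hk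
    · exact hq v h

theorem conn_succ_aux (g : List (List Int)) (k : Nat) :
    ∀ (N : Nat) (p : List Nat) (j l : Nat), p.length ≤ N → (∀ v ∈ p, v < k + 1) →
      PathE g j p l → Conn g k j l ∨ (Conn g k j k ∧ Conn g k k l) := by
  intro N
  induction N with
  | zero =>
      intro p j l hlen hmem hpath
      have : p = [] := List.eq_nil_of_length_eq_zero (Nat.le_zero.1 hlen)
      subst this
      exact Or.inl ⟨[], by simp, hpath⟩
  | succ N ih =>
      intro p j l hlen hmem hpath
      by_cases hkp : k ∈ p
      · rcases List.append_of_mem hkp with ⟨s, t, rfl⟩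
        have hsplit := (pathE_append g s j k l t).1 hpath
        have hs : Conn g k j k := by
          rcases ih s j k (by simp at hlen ⊢; omega)
            (fun v hv => hmem v (by simp [hv])) hsplit.1 with h | h
          · exact h
          · exact h.1
        have ht : Conn g k k l := by
          rcases ih t k l (by simp at hlen ⊢; omega)
            (fun v hv => hmem v (by simp [hv])) hsplit.2 with h | h
          · exact h
          · exact h.2
        exact Or.inr ⟨hs, ht⟩
      · refine Or.inl ⟨p, fun v hv => ?_, hpath⟩
        have := hmem v hv
        have : v ≠ k := fun h => hkp (h ▸ hv)
        omega

theorem conn_succ (g : List (List Int)) (k j l : Nat) :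
    Conn g (k + 1) j l ↔ Conn g k j l ∨ (Conn g k j k ∧ Conn g k k l) := by
  constructor
  · rintro ⟨p, hp, hpath⟩
    exact conn_succ_aux g k p.length p j l le_rfl hp hpath
  · rintro (h | ⟨h1, h2⟩)
    · exact conn_widen g (Nat.le_succ k) h
    · exact conn_comp g (Nat.lt_succ_self k) (conn_widen g (Nat.le_succ k) h1)
        (conn_widen g (Nat.le_succ k) h2)

-- shortening: any path with vertices < n can be replaced by one of length ≤ n
theorem pvDupSplit : ∀ (p : List Nat), ¬ p.Nodup →
    ∃ s a t u, p = s ++ a :: (t ++ a :: u) := by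
  intro p
  induction p with
  | nil => intro h; exact absurd List.nodup_nil h
  | cons x xs ih =>
      intro h
      rw [List.nodup_cons] at h
      by_cases hx : x ∈ xs
      · rcases List.append_of_mem hx with ⟨t, u, rfl⟩
        exact ⟨[], x, t, u, by simp⟩
      · have : ¬ xs.Nodup := fun hn => h ⟨hx, hn⟩
        rcases ih this with ⟨s, a, t, u, rfl⟩
        exact ⟨x :: s, a, t, u, by simp⟩

theorem pvNodupLen {n : Nat} (p : List Nat) (hnd : p.Nodup) (hmem : ∀ v ∈ p, v < n) :
    p.length ≤ n := by
  have h1 : p.toFinset.card = p.length := List.toFinset_card_of_nodup hnd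
  have h2 : p.toFinset ⊆ Finset.range n := by
    intro v hv
    exact Finset.mem_range.2 (hmem v (List.mem_toFinset.1 hv))
  calc p.length = p.toFinset.card := h1.symm
    _ ≤ (Finset.range n).card := Finset.card_le_card h2
    _ = n := Finset.card_range n

theorem pathE_shorten (g : List (List Int)) (n : Nat) :
    ∀ (N : Nat) (p : List Nat) (j l : Nat), p.length ≤ N → (∀ v ∈ p, v < n) →
      PathE g j p l → ∃ q, q.length ≤ n ∧ (∀ v ∈ q, v < n) ∧ PathE g j q l := by
  intro N
  induction N with
  | zero =>
      intro p j l hlen hmem hpath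
      have : p = [] := List.eq_nil_of_length_eq_zero (Nat.le_zero.1 hlen)
      subst this
      exact ⟨[], by simp, by simp, hpath⟩
  | succ N ih =>
      intro p j l hlen hmem hpath
      by_cases hnd : p.Nodup
      · exact ⟨p, pvNodupLen p hnd hmem, hmem, hpath⟩
      · rcases pvDupSplit p hnd with ⟨s, a, t, u, rfl⟩
        have h1 := (pathE_append g s j a l (t ++ a :: u)).1 hpath
        have h2 := (pathE_append g t a a l u).1 h1.2
        have hshort : PathE g j (s ++ a :: u) l :=
          (pathE_append g s j a l u).2 ⟨h1.1, h2.2⟩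
        refine ih (s ++ a :: u) j l ?_ ?_ hshort
        · simp at hlen ⊢; omega
        · intro v hv
          apply hmem v
          simp at hv ⊢
          tauto

-- ---- A side ----

def ShapeA (g m : List (List Int)) : Prop :=
  m.length = g.length ∧ ∀ i, (m.getD i []).length = (g.getD i []).length

def EMono (m m' : List (List Int)) : Prop :=
  ∀ a b, pvEntry m a b ≠ 0 → pvEntry m' a b ≠ 0

def SoundA (g m : List (List Int)) : Prop :=
  ∀ j l, j < g.length → l < g.length → pvEntry m j l ≠ 0 → Conn g g.length j l

def Wcount (g m : List (List Int)) : Int :=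
  ∑ j ∈ Finset.range g.length, ∑ l ∈ Finset.range g.length,
    if pvEntry m j l ≠ 0 then (1 : Int) else 0

def AInv (g : List (List Int)) (st : List (List Int) × Int) : Prop :=
  ShapeA g st.1 ∧ EMono g st.1 ∧ SoundA g st.1 ∧ st.2 = Wcount g st.1 - Wcount g g

theorem shapeA_set (g m : List (List Int)) (j l : Nat) (h : ShapeA g m) :
    ShapeA g (pvSet1 m j l) := by
  obtain ⟨h1, h2⟩ := h
  constructor
  · simp [pvSet1, h1]
  · intro i
    unfold pvSet1
    rw [pvGetDSet]
    split_ifs with hc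
    · rw [List.length_set, ← hc.1]; exact h2 j
    · exact h2 i

theorem emono_set (m : List (List Int)) (j l : Nat) : EMono m (pvSet1 m j l) := by
  intro a b h
  rcases pvEntrySetCases m j l a b with hc | hc <;> rw [hc]
  · exact h
  · exact one_ne_zero

theorem emono_refl (m : List (List Int)) : EMono m m := fun _ _ h => h

theorem emono_trans {m1 m2 m3 : List (List Int)} (h1 : EMono m1 m2) (h2 : EMono m2 m3) :
    EMono m1 m3 := fun a b h => h2 a b (h1 a b h)

theorem step_shape (g : List (List Int)) (st : List (List Int) × Int) (j k l : Nat)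
    (h : ShapeA g st.1) : ShapeA g (preStep st j k l).1 := by
  unfold preStep
  split
  · exact shapeA_set g st.1 j l h
  · exact h

theorem step_emono (st : List (List Int) × Int) (j k l : Nat) :
    EMono st.1 (preStep st j k l).1 := by
  unfold preStep
  split
  · exact emono_set st.1 j l
  · exact emono_refl st.1

-- the precondition puts l in range of row j, so the write really happens
theorem row_long (g : List (List Int)) (hpre : Pre_pre_do g) (j : Nat) (hj : j < g.length) :
    g.length ≤ (g.getD j []).length := by
  rw [List.getD_eq_getElem g [] hj]
  exact hpre g[j] (List.getElem_mem hj)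

theorem wcount_set (g m : List (List Int)) (j l : Nat)
    (hj : j < g.length) (hl : l < g.length)
    (hjm : j < m.length) (hlm : l < (m.getD j []).length)
    (h0 : pvEntry m j l = 0) :
    Wcount g (pvSet1 m j l) = Wcount g m + 1 := by
  unfold Wcount
  have key : ∀ a b : Nat,
      (if pvEntry (pvSet1 m j l) a b ≠ 0 then (1 : Int) else 0) =
      (if pvEntry m a b ≠ 0 then (1 : Int) else 0) +
        (if a = j ∧ b = l then 1 else 0) := by
    intro a b
    rw [pvEntrySet]
    by_cases hab : j = a ∧ j < m.length ∧ l = b ∧ l < (m.getD j []).length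
    · rw [if_pos hab]
      obtain ⟨rfl, -, rfl, -⟩ := hab
      simp [h0]
    · rw [if_neg hab]
      have hne : ¬ (a = j ∧ b = l) := by
        rintro ⟨rfl, rfl⟩
        exact hab ⟨rfl, hjm, rfl, hlm⟩
      simp [hne]
  calc
    (∑ a ∈ Finset.range g.length, ∑ b ∈ Finset.range g.length,
        if pvEntry (pvSet1 m j l) a b ≠ 0 then (1 : Int) else 0)
      = ∑ a ∈ Finset.range g.length, ∑ b ∈ Finset.range g.length,
          ((if pvEntry m a b ≠ 0 then (1 : Int) else 0) +
            (if a = j ∧ b = l then 1 else 0)) := by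
        apply Finset.sum_congr rfl; intro a _
        apply Finset.sum_congr rfl; intro b _
        exact key a b
    _ = (∑ a ∈ Finset.range g.length, ∑ b ∈ Finset.range g.length,
          if pvEntry m a b ≠ 0 then (1 : Int) else 0) +
        (∑ a ∈ Finset.range g.length, ∑ b ∈ Finset.range g.length,
          if a = j ∧ b = l then (1 : Int) else 0) := by
        rw [← Finset.sum_add_distrib]
        apply Finset.sum_congr rfl; intro a _
        rw [← Finset.sum_add_distrib]
    _ = (∑ a ∈ Finset.range g.length, ∑ b ∈ Finset.range g.length,
          if pvEntry m a b ≠ 0 then (1 : Int) else 0) + 1 := by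
        congr 1
        have inner : ∀ a : Nat, (∑ b ∈ Finset.range g.length,
            if a = j ∧ b = l then (1 : Int) else 0) = if a = j then 1 else 0 := by
          intro a
          by_cases ha : a = j
          · subst ha
            simp only [true_and]
            rw [Finset.sum_ite_eq' (Finset.range g.length) l (fun _ => (1 : Int))]
            simp [hl]
          · simp [ha]
        rw [Finset.sum_congr rfl (fun a _ => inner a)]
        rw [Finset.sum_ite_eq' (Finset.range g.length) j (fun _ => (1 : Int))]
        simp [hj]

theorem step_AInv (g : List (List Int)) (hpre : Pre_pre_do g)
    (st : List (List Int) × Int) (j k l : Nat)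
    (hj : j < g.length) (hk : k < g.length) (hl : l < g.length)
    (h : AInv g st) : AInv g (preStep st j k l) := by
  obtain ⟨hshape, hmono, hsound, hcount⟩ := h
  unfold preStep
  split
  case isTrue hguard =>
    simp only [Bool.and_eq_true, bne_iff_ne, ne_eq, Bool.not_eq_eq_eq_not,
      Bool.not_true, bne_eq_false_iff_eq] at hguard
    obtain ⟨⟨hjk, hkl⟩, hjl⟩ := hguard
    have hjm : j < st.1.length := hshape.1 ▸ hj
    have hlm : l < (st.1.getD j []).length := by
      rw [hshape.2 j]
      exact lt_of_lt_of_le hl (row_long g hpre j hj)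
    refine ⟨shapeA_set g st.1 j l hshape, ?_, ?_, ?_⟩
    · exact emono_trans hmono (emono_set st.1 j l)
    · intro a b ha hb hab
      rcases pvEntrySetCases st.1 j l a b with hc | hc
      · exact hsound a b ha hb (hc ▸ hab)
      · -- the entry was possibly written; either way Conn holds for (j,l)
        by_cases hcase : a = j ∧ b = l
        · obtain ⟨rfl, rfl⟩ := hcase
          exact conn_comp g hk (hsound a k ha hk hjk) (hsound k b hk hb hkl)
        · have : pvEntry (pvSet1 st.1 j l) a b = pvEntry st.1 a b := by
            rw [pvEntrySet]
            apply if_neg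
            rintro ⟨rfl, -, rfl, -⟩
            exact hcase ⟨rfl, rfl⟩
          exact hsound a b ha hb (this ▸ hab)
    · simp only
      rw [wcount_set g st.1 j l hj hl hjm hlm hjl, hcount]
      ring
  case isFalse => exact ⟨hshape, hmono, hsound, hcount⟩

-- one pass preserves AInv
theorem pass_AInv (g : List (List Int)) (hpre : Pre_pre_do g)
    (st : List (List Int) × Int) (h : AInv g st) : AInv g (prePass g.length st) := by
  unfold prePass
  refine pvFoldlInv (fun (s : List (List Int) × Int) j hjmem hs => ?_) h
  refine pvFoldlInv (fun (s : List (List Int) × Int) k hkmem hs => ?_) hs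
  refine pvFoldlInv (fun (s : List (List Int) × Int) l hlmem hs => ?_) hs
  exact step_AInv g hpre s j k l (List.mem_range.1 hjmem) (List.mem_range.1 hkmem)
    (List.mem_range.1 hlmem) hs

-- the "squaring" fact: if the state has entries (j,k) and (k,l), one pass sets (j,l)
theorem innerL_hit (g : List (List Int)) (hpre : Pre_pre_do g)
    (st : List (List Int) × Int) (j k l : Nat)
    (hshape : ShapeA g st.1) (hj : j < g.length) (hl : l < g.length)
    (h1 : pvEntry st.1 j k ≠ 0) (h2 : pvEntry st.1 k l ≠ 0) :
    pvEntry ((List.range g.length).foldl (fun st l => preStep st j k l) st).1 j l ≠ 0 := by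
  have hsplit : List.range g.length =
      (List.range l ++ [l]) ++ (List.range (g.length - (l + 1))).map (fun x => (l + 1) + x) := by
    rw [← List.range_succ, ← List.range_add]
    congr 1
    omega
  rw [hsplit, List.foldl_append, List.foldl_append]
  set s1 := (List.range l).foldl (fun st l => preStep st j k l) st with hs1
  have hinv1 : ShapeA g s1.1 ∧ EMono st.1 s1.1 := by
    exact pvFoldlInv (P := fun (s : List (List Int) × Int) => ShapeA g s.1 ∧ EMono st.1 s.1)
      (fun s x _ hs => ⟨step_shape g s j k x hs.1, emono_trans hs.2 (step_emono s j k x)⟩)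
      ⟨hshape, emono_refl _⟩
  have hhit : pvEntry (List.foldl (fun st l => preStep st j k l) s1 [l]).1 j l ≠ 0 := by
    show pvEntry (preStep s1 j k l).1 j l ≠ 0
    rcases eq_or_ne (pvEntry s1.1 j l) 0 with hjl | hjl
    · have hguard : (pvEntry s1.1 j k != 0 && (pvEntry s1.1 k l != 0) &&
          !(pvEntry s1.1 j l != 0)) = true := by
        simp [bne_iff_ne, hinv1.2 j k h1, hinv1.2 k l h2, hjl]
      unfold preStep
      rw [if_pos hguard]
      show pvEntry (pvSet1 s1.1 j l) j l ≠ 0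
      have hjm : j < s1.1.length := hinv1.1.1 ▸ hj
      have hlm : l < (s1.1.getD j []).length := by
        rw [hinv1.1.2 j]
        exact lt_of_lt_of_le hl (row_long g hpre j hj)
      rw [pvEntrySetHit s1.1 j l hjm hlm]
      exact one_ne_zero
    · exact step_emono s1 j k l j l hjl
  exact pvFoldlInv (P := fun (s : List (List Int) × Int) => pvEntry s.1 j l ≠ 0)
    (fun s x _ hs => step_emono s j k x j l hs) hhit

-- preStep folds preserve shape and only add entries
theorem foldK_pres (g : List (List Int)) (j : Nat) (st : List (List Int) × Int)
    (h : ShapeA g st.1) :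
    ShapeA g ((List.range g.length).foldl (fun st k =>
        (List.range g.length).foldl (fun st l => preStep st j k l) st) st).1 ∧
    EMono st.1 ((List.range g.length).foldl (fun st k =>
        (List.range g.length).foldl (fun st l => preStep st j k l) st) st).1 := by
  refine pvFoldlInv (P := fun (s : List (List Int) × Int) => ShapeA g s.1 ∧ EMono st.1 s.1)
    (fun s k _ hs => ?_) ⟨h, emono_refl _⟩
  exact pvFoldlInv (P := fun (s : List (List Int) × Int) => ShapeA g s.1 ∧ EMono st.1 s.1)
    (fun s x _ hs2 => ⟨step_shape g s j k x hs2.1, emono_trans hs2.2 (step_emono s j k x)⟩) hs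

theorem foldK_keep (g : List (List Int)) (j a b : Nat) (st : List (List Int) × Int)
    (h : pvEntry st.1 a b ≠ 0) :
    pvEntry ((List.range g.length).foldl (fun st k =>
        (List.range g.length).foldl (fun st l => preStep st j k l) st) st).1 a b ≠ 0 := by
  refine pvFoldlInv (P := fun (s : List (List Int) × Int) => pvEntry s.1 a b ≠ 0)
    (fun s k _ hs => ?_) h
  exact pvFoldlInv (P := fun (s : List (List Int) × Int) => pvEntry s.1 a b ≠ 0)
    (fun s x _ hs2 => step_emono s j k x a b hs2) hs

theorem innerK_hit (g : List (List Int)) (hpre : Pre_pre_do g)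
    (st : List (List Int) × Int) (j k l : Nat)
    (hshape : ShapeA g st.1) (hj : j < g.length) (hk : k < g.length) (hl : l < g.length)
    (h1 : pvEntry st.1 j k ≠ 0) (h2 : pvEntry st.1 k l ≠ 0) :
    pvEntry ((List.range g.length).foldl (fun st k =>
        (List.range g.length).foldl (fun st l => preStep st j k l) st) st).1 j l ≠ 0 := by
  rw [pvFoldlSplitAt _ g.length k hk st]
  set s1 := (List.range k).foldl (fun st k =>
      (List.range g.length).foldl (fun st l => preStep st j k l) st) st with hs1
  have hinv1 : ShapeA g s1.1 ∧ EMono st.1 s1.1 := by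
    refine pvFoldlInv (P := fun (s : List (List Int) × Int) => ShapeA g s.1 ∧ EMono st.1 s.1)
      (fun s k' _ hs => ?_) ⟨hshape, emono_refl _⟩
    exact pvFoldlInv (P := fun (s : List (List Int) × Int) => ShapeA g s.1 ∧ EMono st.1 s.1)
      (fun s x _ hs2 => ⟨step_shape g s j k' x hs2.1, emono_trans hs2.2 (step_emono s j k' x)⟩) hs
  have hhit : pvEntry ((List.range g.length).foldl
      (fun st l => preStep st j k l) s1).1 j l ≠ 0 :=
    innerL_hit g hpre s1 j k l hinv1.1 hj hl (hinv1.2 j k h1) (hinv1.2 k l h2)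
  refine pvFoldlInv (P := fun (s : List (List Int) × Int) => pvEntry s.1 j l ≠ 0)
    (fun s k' _ hs => ?_) hhit
  exact pvFoldlInv (P := fun (s : List (List Int) × Int) => pvEntry s.1 j l ≠ 0)
    (fun s x _ hs2 => step_emono s j k' x j l hs2) hs

theorem pass_hit (g : List (List Int)) (hpre : Pre_pre_do g)
    (st : List (List Int) × Int) (j k l : Nat)
    (hshape : ShapeA g st.1) (hj : j < g.length) (hk : k < g.length) (hl : l < g.length)
    (h1 : pvEntry st.1 j k ≠ 0) (h2 : pvEntry st.1 k l ≠ 0) :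
    pvEntry (prePass g.length st).1 j l ≠ 0 := by
  unfold prePass
  rw [pvFoldlSplitAt _ g.length j hj st]
  set s1 := (List.range j).foldl (fun st j =>
      (List.range g.length).foldl (fun st k =>
        (List.range g.length).foldl (fun st l => preStep st j k l) st) st) st with hs1
  have hinv1 : ShapeA g s1.1 ∧ EMono st.1 s1.1 := by
    refine pvFoldlInv (P := fun (s : List (List Int) × Int) => ShapeA g s.1 ∧ EMono st.1 s.1)
      (fun s j' _ hs => ?_) ⟨hshape, emono_refl _⟩
    have := foldK_pres g j' s hs.1
    exact ⟨this.1, emono_trans hs.2 this.2⟩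
  have hhit : pvEntry ((List.range g.length).foldl (fun st k =>
      (List.range g.length).foldl (fun st l => preStep st j k l) st) s1).1 j l ≠ 0 :=
    innerK_hit g hpre s1 j k l hinv1.1 hj hk hl (hinv1.2 j k h1) (hinv1.2 k l h2)
  refine pvFoldlInv (P := fun (s : List (List Int) × Int) => pvEntry s.1 j l ≠ 0)
    (fun s j' _ hs => ?_) hhit
  exact foldK_keep g j' j l s hs

-- the state of A after i outer passes
def stA (g : List (List Int)) (i : Nat) : List (List Int) × Int :=
  (List.range i).foldl (fun st _i => prePass g.length st) (g, 0)

theorem stA_succ (g : List (List Int)) (i : Nat) :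
    stA g (i + 1) = prePass g.length (stA g i) := by
  unfold stA
  rw [List.range_succ, List.foldl_append]
  rfl

theorem stA_AInv (g : List (List Int)) (hpre : Pre_pre_do g) (i : Nat) :
    AInv g (stA g i) := by
  induction i with
  | zero =>
      show AInv g (g, 0)
      refine ⟨⟨rfl, fun _ => rfl⟩, emono_refl g, ?_, by rw [sub_self]⟩
      intro j l _ _ h
      exact ⟨[], by simp, h⟩
  | succ i ih =>
      rw [stA_succ]
      exact pass_AInv g hpre (stA g i) ih

theorem stA_complete (g : List (List Int)) (hpre : Pre_pre_do g) :
    ∀ (i : Nat) (p : List Nat) (j l : Nat), j < g.length → l < g.length →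
      (∀ v ∈ p, v < g.length) → p.length ≤ i → PathE g j p l →
      pvEntry (stA g i).1 j l ≠ 0 := by
  intro i
  induction i with
  | zero =>
      intro p j l _ _ _ hlen hpath
      have : p = [] := List.eq_nil_of_length_eq_zero (Nat.le_zero.1 hlen)
      subst this
      exact hpath
  | succ i ih =>
      intro p j l hj hl hmem hlen hpath
      rcases List.eq_nil_or_concat p with rfl | ⟨p', x, rfl⟩
      · exact (stA_AInv g hpre (i + 1)).2.1 j l hpath
      · rw [List.concat_eq_append] at *
        have hsplit := (pathE_append g p' j x l []).1 hpath
        have hx : x < g.length := hmem x (by simp)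
        have hjx : pvEntry (stA g i).1 j x ≠ 0 := by
          refine ih p' j x hj hx (fun v hv => hmem v (by simp [hv])) ?_ hsplit.1
          simp at hlen ⊢
          omega
        have hxl : pvEntry (stA g i).1 x l ≠ 0 :=
          (stA_AInv g hpre i).2.1 x l hsplit.2
        rw [stA_succ]
        exact pass_hit g hpre (stA g i) j x l (stA_AInv g hpre i).1 hj hx hl hjx hxl

theorem A_final_iff (g : List (List Int)) (hpre : Pre_pre_do g) (j l : Nat)
    (hj : j < g.length) (hl : l < g.length) :
    pvEntry (stA g g.length).1 j l ≠ 0 ↔ Conn g g.length j l := by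
  constructor
  · exact (stA_AInv g hpre g.length).2.2.1 j l hj hl
  · rintro ⟨p, hmem, hpath⟩
    rcases pathE_shorten g g.length p.length p j l le_rfl hmem hpath with
      ⟨q, hqlen, hqmem, hqpath⟩
    exact stA_complete g hpre g.length q j l hj hl hqmem hqlen hqpath

theorem pre_do_eq (g : List (List Int)) : pre_do g = (stA g g.length).2 := rfl

-- ---- B side ----

def ShapeB (n : Nat) (c : List (List Bool)) : Prop :=
  c.length = n ∧ ∀ i, i < n → (c.getD i []).length = n

def GFun (c : List (List Bool)) (k a b : Nat) : Bool :=
  pvB c a b || (pvB c a k && pvB c k b)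

theorem fwRow_length (ck : List Bool) (n : Nat) (row : List Bool) :
    (fwRow ck n row).length = row.length := by
  unfold fwRow
  refine pvFoldlInv (P := fun (r : List Bool) => r.length = row.length)
    (fun r x _ h => ?_) rfl
  show (if ck.getD x false = true then r.set x true else r).length = row.length
  by_cases hc : ck.getD x false = true
  · rw [if_pos hc, List.length_set]; exact h
  · rw [if_neg hc]; exact h

theorem fwRow_getD (ck : List Bool) :
    ∀ (xs : List Nat) (row : List Bool) (b : Nat), b < row.length →
      ((xs.foldl (fun r l => if ck.getD l false then r.set l true else r) row).getD b false)
        = if b ∈ xs ∧ ck.getD b false = true then true else row.getD b false := by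
  intro xs
  induction xs with
  | nil => intro row b _; simp
  | cons x xs ih =>
      intro row b hb
      rw [List.foldl_cons]
      have hlen : (if ck.getD x false = true then row.set x true else row).length = row.length := by
        by_cases hc : ck.getD x false = true
        · rw [if_pos hc, List.length_set]
        · rw [if_neg hc]
      rw [ih _ b (hlen ▸ hb)]
      by_cases hmem : b ∈ xs ∧ ck.getD b false = true
      · rw [if_pos hmem, if_pos ⟨List.mem_cons_of_mem x hmem.1, hmem.2⟩]
      · rw [if_neg hmem]
        by_cases hxb : x = b
        · subst hxb
          by_cases hc : ck.getD x false = true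
          · rw [if_pos hc, pvGetDSet, if_pos ⟨rfl, hb⟩, if_pos ⟨List.mem_cons_self, hc⟩]
          · rw [if_neg hc, if_neg (by
              rintro ⟨-, hc2⟩
              exact hc hc2)]
        · have hrow : (if ck.getD x false = true then row.set x true else row).getD b false
              = row.getD b false := by
            by_cases hc : ck.getD x false = true
            · rw [if_pos hc, pvGetDSet, if_neg (by rintro ⟨rfl, -⟩; exact hxb rfl)]
            · rw [if_neg hc]
          rw [hrow]
          by_cases hcb : b ∈ x :: xs ∧ ck.getD b false = true
          · exfalso
            rcases List.mem_cons.1 hcb.1 with rfl | hbx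
            · exact hxb rfl
            · exact hmem ⟨hbx, hcb.2⟩
          · rw [if_neg hcb]

theorem fwK_aux (n k : Nat) (c : List (List Bool)) (hk : k < n) :
    ∀ (js S : List Nat) (c' : List (List Bool)), (∀ x ∈ js, x < n) → ShapeB n c' →
      (∀ a b, a < n → b < n →
        pvB c' a b = if a ∈ S then GFun c k a b else pvB c a b) →
      ShapeB n (js.foldl (fun c2 j =>
          if pvB c2 j k then c2.set j (fwRow (c.getD k []) n (c2.getD j [])) else c2) c') ∧
      (∀ a b, a < n → b < n →
        pvB (js.foldl (fun c2 j =>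
          if pvB c2 j k then c2.set j (fwRow (c.getD k []) n (c2.getD j [])) else c2) c') a b
          = if a ∈ S ++ js then GFun c k a b else pvB c a b) := by
  intro js
  induction js with
  | nil =>
      intro S c' _ hshape hinv
      refine ⟨hshape, fun a b ha hb => ?_⟩
      rw [List.append_nil]
      exact hinv a b ha hb
  | cons x js ih =>
      intro S c' hjs hshape hinv
      have hx : x < n := hjs x (List.mem_cons_self)
      rw [List.foldl_cons]
      have hguard : pvB c' x k = pvB c x k := by
        rw [hinv x k hx hk]
        by_cases hS : x ∈ S
        · rw [if_pos hS]
          unfold GFun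
          cases hxk : pvB c x k <;> simp
        · rw [if_neg hS]
      have hshape2 : ShapeB n (if pvB c' x k then
          c'.set x (fwRow (c.getD k []) n (c'.getD x [])) else c') := by
        by_cases hg : pvB c' x k = true
        · rw [if_pos hg]
          refine ⟨by rw [List.length_set]; exact hshape.1, fun i hi => ?_⟩
          rw [pvGetDSet]
          by_cases hxi : x = i ∧ x < c'.length
          · rw [if_pos hxi, fwRow_length]
            exact hshape.2 x hx
          · rw [if_neg hxi]
            exact hshape.2 i hi
        · rw [if_neg hg]
          exact hshape
      have hinv2 : ∀ a b, a < n → b < n →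
          pvB (if pvB c' x k then
            c'.set x (fwRow (c.getD k []) n (c'.getD x [])) else c') a b
            = if a ∈ S ++ [x] then GFun c k a b else pvB c a b := by
        intro a b ha hb
        by_cases hax : a = x
        · subst hax
          have hval : pvB (if pvB c' a k then
              c'.set a (fwRow (c.getD k []) n (c'.getD a [])) else c') a b
              = GFun c k a b := by
            by_cases hg : pvB c' a k = true
            · rw [if_pos hg]
              show (((c'.set a (fwRow (c.getD k []) n (c'.getD a []))).getD a []).getD b false) = _
              rw [pvGetDSet, if_pos ⟨rfl, by rw [hshape.1]; exact ha⟩]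
              unfold fwRow
              rw [fwRow_getD (c.getD k []) (List.range n) (c'.getD a []) b
                (by rw [hshape.2 a ha]; exact hb)]
              have hak : pvB c a k = true := by rw [← hguard]; exact hg
              have hrow : (c'.getD a []).getD b false = pvB c' a b := rfl
              have hck : (c.getD k []).getD b false = pvB c k b := rfl
              simp only [List.mem_range]
              rw [hrow, hinv a b ha hb]
              by_cases hS : a ∈ S
              · rw [if_pos hS]
                simp only [hck]
                unfold GFun
                rw [hak]
                cases h1 : pvB c k b <;> simp [hb]
              · rw [if_neg hS]
                simp only [hck]
                unfold GFun
                rw [hak]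
                cases h1 : pvB c k b <;> simp [hb]
            · rw [if_neg hg]
              have hak : pvB c a k = false := by
                cases h : pvB c a k
                · rfl
                · exact absurd (hguard.trans h) hg
              rw [hinv a b ha hb]
              by_cases hS : a ∈ S
              · rw [if_pos hS]
              · rw [if_neg hS]
                unfold GFun
                rw [hak]
                simp
          rw [hval, if_pos (by simp)]
        · have hout : pvB (if pvB c' x k then
              c'.set x (fwRow (c.getD k []) n (c'.getD x [])) else c') a b = pvB c' a b := by
            by_cases hg : pvB c' x k = true
            · rw [if_pos hg]
              show (((c'.set x (fwRow (c.getD k []) n (c'.getD x []))).getD a []).getD b false) = _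
              rw [pvGetDSet, if_neg (by rintro ⟨rfl, -⟩; exact hax rfl)]
              rfl
            · rw [if_neg hg]
          rw [hout, hinv a b ha hb]
          have hmm : (a ∈ S ++ [x]) ↔ a ∈ S := by
            simp [hax]
          by_cases hS : a ∈ S
          · rw [if_pos hS, if_pos (hmm.2 hS)]
          · rw [if_neg hS, if_neg (fun hc2 => hS (hmm.1 hc2))]
      have := ih (S ++ [x]) _ (fun v hv => hjs v (List.mem_cons_of_mem x hv)) hshape2 hinv2
      refine ⟨this.1, fun a b ha hb => ?_⟩
      rw [this.2 a b ha hb]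
      have : (a ∈ (S ++ [x]) ++ js) ↔ a ∈ S ++ x :: js := by simp
      by_cases hS : a ∈ (S ++ [x]) ++ js
      · rw [if_pos hS, if_pos (this.1 hS)]
      · rw [if_neg hS, if_neg (fun hc2 => hS (this.2 hc2))]

theorem fwK_char (n k : Nat) (c : List (List Bool)) (hk : k < n) (hc : ShapeB n c) :
    ShapeB n (fwK n c k) ∧
    ∀ a b, a < n → b < n → pvB (fwK n c k) a b = GFun c k a b := by
  have h := fwK_aux n k c hk (List.range n) [] c
    (fun x hx => List.mem_range.1 hx) hc
    (fun a b _ _ => by rw [if_neg (List.not_mem_nil)])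
  constructor
  · show ShapeB n ((List.range n).foldl (fun c2 j =>
      if pvB c2 j k then c2.set j (fwRow (c.getD k []) n (c2.getD j [])) else c2) c)
    exact h.1
  · intro a b ha hb
    show pvB ((List.range n).foldl (fun c2 j =>
      if pvB c2 j k then c2.set j (fwRow (c.getD k []) n (c2.getD j [])) else c2) c) a b
      = GFun c k a b
    rw [h.2 a b ha hb, if_pos (by simp [ha])]

-- the state of B after the first k rounds of Floyd-Warshall
def stB (g : List (List Int)) (k : Nat) : List (List Bool) :=
  (List.range k).foldl (fwK g.length)
    ((List.range g.length).map (fun j => (List.range g.length).map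
      (fun l => pvEntry g j l != 0)))

theorem stB_succ (g : List (List Int)) (k : Nat) :
    stB g (k + 1) = fwK g.length (stB g k) k := by
  unfold stB
  rw [List.range_succ, List.foldl_append]
  rfl

theorem stB_zero_entry (g : List (List Int)) (a b : Nat)
    (ha : a < g.length) (hb : b < g.length) :
    pvB (stB g 0) a b = (pvEntry g a b != 0) := by
  unfold stB pvB
  rw [List.range_zero, List.foldl_nil]
  rw [PySem.List.getD_map_range _ _ _ _ ha]
  rw [PySem.List.getD_map_range _ _ _ _ hb]

theorem stB_shape (g : List (List Int)) (k : Nat) (hk : k ≤ g.length) :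
    ShapeB g.length (stB g k) := by
  induction k with
  | zero =>
      constructor
      · unfold stB
        rw [List.range_zero, List.foldl_nil, List.length_map, List.length_range]
      · intro i hi
        unfold stB
        rw [List.range_zero, List.foldl_nil]
        rw [PySem.List.getD_map_range _ _ _ _ hi, List.length_map, List.length_range]
  | succ k ih =>
      rw [stB_succ]
      exact (fwK_char g.length k (stB g k) (by omega) (ih (by omega))).1

theorem stB_iff (g : List (List Int)) (k : Nat) (hk : k ≤ g.length) :
    ∀ a b, a < g.length → b < g.length →
      (pvB (stB g k) a b = true ↔ Conn g k a b) := by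
  induction k with
  | zero =>
      intro a b ha hb
      rw [stB_zero_entry g a b ha hb, bne_iff_ne, conn_zero]
      exact Iff.rfl
  | succ k ih =>
      intro a b ha hb
      rw [stB_succ]
      rw [(fwK_char g.length k (stB g k) (by omega) (stB_shape g k (by omega))).2 a b ha hb]
      unfold GFun
      rw [conn_succ]
      simp only [Bool.or_eq_true, Bool.and_eq_true]
      rw [ih (by omega) a b ha hb, ih (by omega) a k ha (by omega),
        ih (by omega) k b (by omega) hb]

-- ---- assembly ----

theorem listsum_finset (n : Nat) (f : Nat → Int) :
    ((List.range n).map f).sum = ∑ i ∈ Finset.range n, f i := by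
  induction n with
  | zero => simp
  | succ n ih => rw [List.sum_range_succ, Finset.sum_range_succ, ih]

theorem pre_do_alt_eq (g : List (List Int)) :
    pre_do_alt g = ∑ j ∈ Finset.range g.length, ∑ l ∈ Finset.range g.length,
      if pvB (stB g g.length) j l && !(pvEntry g j l != 0) then (1 : Int) else 0 := by
  show ((List.range g.length).map (fun j =>
    ((List.range g.length).map (fun l =>
      if pvB (stB g g.length) j l && !(pvEntry g j l != 0) then (1 : Int) else 0)).sum)).sum = _
  rw [listsum_finset]
  exact Finset.sum_congr rfl (fun j _ => listsum_finset _ _)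


-- ===== VERDICT (by name: the statement is the Claim_ definition above) =====
theorem pre_do_spec : Claim_equal_pre_do := by
  unfold Claim_equal_pre_do
  intro g _ hpre
  unfold Spec_pre_do
  rw [pre_do_eq, (stA_AInv g hpre g.length).2.2.2, pre_do_alt_eq]
  unfold Wcount
  rw [← Finset.sum_sub_distrib]
  refine Finset.sum_congr rfl (fun j hj => ?_)
  rw [← Finset.sum_sub_distrib]
  refine Finset.sum_congr rfl (fun l hl => ?_)
  have hjn := Finset.mem_range.1 hj
  have hln := Finset.mem_range.1 hl
  have hA := A_final_iff g hpre j l hjn hln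
  have hB := stB_iff g g.length le_rfl j l hjn hln
  by_cases hE : pvEntry g j l = 0
  · have hb1 : (pvEntry g j l != 0) = false := by simp [hE]
    have hb2 : ¬ (pvEntry g j l ≠ 0) := by simp [hE]
    rw [hb1, if_neg hb2, sub_zero]
    simp only [Bool.not_false, Bool.and_true]
    by_cases hC : Conn g g.length j l
    · rw [if_pos (hA.2 hC), if_pos (hB.2 hC)]
    · rw [if_neg (fun h => hC (hA.1 h)), if_neg (fun h => hC (hB.1 h))]
  · have hCE : Conn g g.length j l := ⟨[], by simp, hE⟩
    have hb1 : (pvEntry g j l != 0) = true := bne_iff_ne.2 hE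
    rw [hb1, if_pos (hA.2 hCE), if_pos hE]
    simp
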